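-- pv_equiv track=rewrite | github.com/ChazzCoin/FairCore | F/OS/__init__.py | get_previous_directory
-- ===== SOURCE A (Python) =====
-- def get_previous_directory(pathIn):
--     parentDir = ""
--     pathCount = len(pathIn) - 1
--     for _ in pathIn:
--         currentChar = pathIn[pathCount]
--         if str(currentChar) == "/":
--             parentDir = pathIn[:pathCount]
--             break
--         pathCount -= 1
--     return parentDir
-- ===== SOURCE B (Python) =====
-- def get_previous_directory(pathIn):
--     return "/".join(pathIn.split("/")[:-1])
-- ===== Notes on version B (the rewrite author's own statement) =====
-- stated objective: idiomatic
-- what changed: B replaces the manual backward character scan (indexing from the end to find the last '/' and slicing) with split on '/', drop the last segment, rejoin.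
import Mathlib
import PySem

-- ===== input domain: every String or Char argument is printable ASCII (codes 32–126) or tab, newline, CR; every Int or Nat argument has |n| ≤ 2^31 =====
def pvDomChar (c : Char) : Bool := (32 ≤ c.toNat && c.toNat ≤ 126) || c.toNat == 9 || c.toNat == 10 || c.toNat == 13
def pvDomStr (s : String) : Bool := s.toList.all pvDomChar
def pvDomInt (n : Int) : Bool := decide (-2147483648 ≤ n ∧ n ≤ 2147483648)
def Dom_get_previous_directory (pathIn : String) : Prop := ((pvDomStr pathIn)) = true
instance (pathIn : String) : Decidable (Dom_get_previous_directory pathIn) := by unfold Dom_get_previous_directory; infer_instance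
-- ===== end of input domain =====

-- B replaces A's manual backward scan for the last '/' with split on '/', drop the last segment, rejoin (idiomatic).

-- ===== PORT A =====
-- the 'for _ in pathIn' loop with break/return; the `none` branch of pyGet? (Python IndexError)
-- is unreachable: pathCount stays within range while the loop still runs
def pvLoopA (cs : List Char) : List Char → Int → String
  | [], _ => ""
  | _ :: rest, pathCount =>
      match PySem.List.pyGet? cs pathCount with
      | none => ""
      | some currentChar =>
        if String.ofList [currentChar] = "/" then
          String.ofList (PySem.List.slice cs none (some pathCount))
        else
          pvLoopA cs rest (pathCount - 1)

def get_previous_directory (pathIn : String) : String :=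
  pvLoopA pathIn.toList pathIn.toList (PySem.Str.len pathIn - 1)

-- ===== PORT B =====
-- pathIn.split("/") ported as List.splitOn '/' (exact for a one-character separator),
-- [:-1] as dropLast, "/".join as List.intercalate ['/']
def get_previous_directory_alt (pathIn : String) : String :=
  String.ofList (List.intercalate ['/'] ((pathIn.toList.splitOn '/').dropLast))

-- ===== PRECONDITION & SPEC =====
def Spec_get_previous_directory (pathIn : String) (out : String) : Prop := out = get_previous_directory_alt pathIn
instance (pathIn : String) (out : String) : Decidable (Spec_get_previous_directory pathIn out) := by unfold Spec_get_previous_directory; infer_instance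

-- ===== CLAIM (what is proved, stated in full; the proofs are below) =====
def Claim_equal_get_previous_directory : Prop := ∀ (pathIn : String), Dom_get_previous_directory pathIn → Spec_get_previous_directory pathIn (get_previous_directory pathIn)

-- ===== LEMMAS AND PROOFS =====

-- reference function: the prefix before the last '/' (empty if there is no '/')
def pvPref : List Char → List Char
  | [] => []
  | c :: cs => if '/' ∈ cs then c :: pvPref cs else []

theorem pvPref_snoc (ys : List Char) (c : Char) :
    pvPref (ys ++ [c]) = if c = '/' then ys else pvPref ys := by
  induction ys with
  | nil => by_cases h : c = '/' <;> simp [pvPref, h]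
  | cons b ys ih =>
    by_cases h : c = '/'
    · simpa [pvPref, h] using ih
    · by_cases hm : '/' ∈ ys <;> simp [pvPref, h, hm, ih, eq_comm]

theorem pvSplit_len_ge_two (cs : List Char) (h : '/' ∈ cs) :
    2 ≤ (cs.splitOn '/').length := by
  induction cs with
  | nil => simp at h
  | cons c cs ih =>
    rw [List.splitOn, List.splitOnP_cons]
    rcases hs : cs.splitOnP (· == '/') with _ | ⟨a, l⟩
    · exact absurd hs (List.splitOnP_ne_nil _ cs)
    · by_cases hc : c = '/'
      · simp [hc]
      · have hm : '/' ∈ cs := (List.mem_cons.mp h).resolve_left (fun h1 => hc h1.symm)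
        have h2 := ih hm
        rw [List.splitOn, hs] at h2
        simpa [hc, List.modifyHead] using h2

theorem pvSplit_not_mem (cs : List Char) (h : '/' ∉ cs) :
    cs.splitOn '/' = [cs] := by
  rw [List.splitOn]
  apply List.splitOnP_eq_single
  intro x hx
  simp only [beq_iff_eq]
  intro hxe
  exact h (hxe ▸ hx)

theorem pvInter_cons (s : List Char) (c : Char) (x : List Char) (xs : List (List Char)) :
    List.intercalate s ((c :: x) :: xs) = c :: List.intercalate s (x :: xs) := by
  cases xs <;> simp [List.intercalate, List.intersperse]

theorem pvInter_nil_cons (s : List Char) (x : List Char) (xs : List (List Char)) :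
    List.intercalate s ([] :: x :: xs) = s ++ List.intercalate s (x :: xs) := by
  cases xs <;> simp [List.intercalate, List.intersperse]

-- B's value equals the prefix before the last '/'
theorem pvB_eq_pref (cs : List Char) :
    List.intercalate ['/'] ((cs.splitOn '/').dropLast) = pvPref cs := by
  induction cs with
  | nil => simp [pvPref, List.splitOn, List.intercalate]
  | cons c cs ih =>
    by_cases hm : '/' ∈ cs
    · have h2 := pvSplit_len_ge_two cs hm
      rw [List.splitOn, List.splitOnP_cons] at *
      rcases hs : cs.splitOnP (· == '/') with _ | ⟨s0, S⟩
      · exact absurd hs (List.splitOnP_ne_nil _ cs)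
      · rw [hs] at h2 ih
        have hS : S ≠ [] := by
          intro hh; rw [hh] at h2; simp at h2
        rw [List.dropLast_cons_of_ne_nil hS] at ih
        by_cases hc : c = '/'
        · simp only [hc, beq_self_eq_true, if_true]
          rw [List.dropLast_cons_of_ne_nil (by simp),
            List.dropLast_cons_of_ne_nil hS, pvInter_nil_cons, ih]
          simp [pvPref, hm]
        · simp only [beq_iff_eq, hc, if_false, List.modifyHead]
          rw [show ((c :: s0) :: S).dropLast = (c :: s0) :: S.dropLast from
            List.dropLast_cons_of_ne_nil hS, pvInter_cons, ih]
          simp [pvPref, hm]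
    · have h1 := pvSplit_not_mem cs hm
      rw [List.splitOn, List.splitOnP_cons]
      rw [List.splitOn] at h1
      by_cases hc : c = '/'
      · simp [hc, h1, pvPref, hm, List.intercalate]
      · simp [hc, h1, List.modifyHead, pvPref, hm, List.intercalate]

-- A's backward scan computes pvPref of the first n+1 characters
theorem pvLoopA_eq (fuel : List Char) :
    ∀ (cs : List Char) (n : Nat), fuel.length = n + 1 → n + 1 ≤ cs.length →
      pvLoopA cs fuel ((n : Int)) = String.ofList (pvPref (cs.take (n + 1))) := by
  induction fuel with
  | nil => intro cs n h; simp at h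
  | cons a rest ih =>
    intro cs n hlen hle
    have hn : n < cs.length := by omega
    have hget : PySem.List.pyGet? cs ((n : Int)) = cs[n]? := PySem.List.pyGet?_natCast cs n
    have hsome : cs[n]? = some cs[n] := List.getElem?_eq_getElem hn
    have htake : cs.take (n + 1) = cs.take n ++ [cs[n]] := by
      rw [List.take_add_one, hsome]; rfl
    simp only [pvLoopA, hget, hsome]
    by_cases hc : cs[n] = '/'
    · have hyes : String.ofList [cs[n]] = "/" := by rw [hc]
      rw [if_pos hyes, PySem.List.slice_to_natCast, htake, pvPref_snoc, if_pos hc]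
    · have hne : ¬ String.ofList [cs[n]] = "/" := by
        intro h
        exact hc (by simpa using congrArg String.toList h)
      rw [if_neg hne, htake, pvPref_snoc, if_neg hc]
      cases n with
      | zero =>
        have hrest : rest = [] := by
          cases rest with
          | nil => rfl
          | cons b l => simp at hlen
        rw [hrest]
        simp [pvLoopA, pvPref]
      | succ m =>
        have hcast : ((m + 1 : Nat) : Int) - 1 = ((m : Nat) : Int) := by push_cast; ring
        rw [hcast]
        exact ih cs m (by simp at hlen; omega) (by omega)

theorem pvA_eq_pref (pathIn : String) :
    get_previous_directory pathIn = String.ofList (pvPref pathIn.toList) := by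
  unfold get_previous_directory
  rcases hL : pathIn.toList.length with _ | n
  · have hnil : pathIn.toList = [] := List.length_eq_zero_iff.mp hL
    rw [hnil]
    simp [pvLoopA, pvPref]
  · have hlen : PySem.Str.len pathIn - 1 = ((n : Nat) : Int) := by
      rw [PySem.Str.len_eq, hL]; push_cast; ring
    rw [hlen, pvLoopA_eq pathIn.toList pathIn.toList n hL (by omega),
      List.take_of_length_le (by omega)]

-- ===== VERDICT (by name: the statement is the Claim_ definition above) =====
theorem get_previous_directory_spec : Claim_equal_get_previous_directory := by
  intro pathIn _
  unfold Spec_get_previous_directory get_previous_directory_alt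
  rw [pvA_eq_pref, pvB_eq_pref]
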